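-- pv_equiv track=rewrite | github.com/RooTinfinite/leetcode-solutions | solutions/4000-count-bowl-subarrays/count-bowl-subarrays.py | bowlSubarrays
-- ===== SOURCE A (Python) =====
-- def bowlSubarrays(nums):
--     res = 0
--     stk = []
--     n = len(nums)
--
--     for i in range(n):
--         while stk and nums[stk[-1]] < nums[i]:
--             if i - stk[-1] >= 2:
--                 res += 1
--             stk.pop()
--         if stk and i - stk[-1] >= 2:
--             res += 1
--         stk.append(i)
--     return res
-- ===== SOURCE B (Python) =====
-- def bowlSubarrays(nums):
--     # Brute-force pair count: a bowl is a pair (j, i), i >= j + 2, whose interior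
--     # maximum is strictly below nums[i] and at most nums[j].
--     n = len(nums)
--     res = 0
--     for i in range(n):
--         for j in range(i - 1):
--             m = max(nums[j + 1:i])
--             if m < nums[i] and m <= nums[j]:
--                 res += 1
--     return res
-- ===== Notes on version B (the rewrite author's own statement) =====
-- stated objective: simpler
-- what changed: Replaces the monotonic-stack single pass by a direct brute-force enumeration of all candidate pairs (j,i) with i>=j+2, counting those whose interior maximum is strictly below nums[i] and at most nums[j] (a declarative spec-like count).
import Mathlib
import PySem

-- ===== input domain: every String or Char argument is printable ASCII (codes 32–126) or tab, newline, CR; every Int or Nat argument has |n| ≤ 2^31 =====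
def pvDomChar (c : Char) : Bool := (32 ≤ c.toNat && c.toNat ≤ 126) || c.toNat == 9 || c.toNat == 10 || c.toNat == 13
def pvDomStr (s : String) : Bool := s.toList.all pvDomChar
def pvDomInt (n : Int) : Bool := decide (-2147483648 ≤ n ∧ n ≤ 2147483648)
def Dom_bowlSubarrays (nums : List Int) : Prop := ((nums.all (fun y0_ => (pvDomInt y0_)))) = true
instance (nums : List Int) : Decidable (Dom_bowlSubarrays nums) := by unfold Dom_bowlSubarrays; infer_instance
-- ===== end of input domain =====

-- B replaces A's monotonic-stack single pass by a direct brute-force count of bowl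
-- pairs (j, i) — simpler, spec-like; not faster (A is linear, B is cubic).


-- ===== PORT A =====
-- the 'while stk and nums[stk[-1]] < nums[i]' loop, as recursion on the stack
-- (stack top = list head; all indices used are in range, so pyGetD's default 0 is never used)
def pvPopLoopA (nums : List Int) (i : Int) : Int → List Int → Int × List Int
  | res, [] => (res, [])
  | res, j :: stk =>
      if PySem.List.pyGetD nums j 0 < PySem.List.pyGetD nums i 0 then
        pvPopLoopA nums i (if 2 ≤ i - j then res + 1 else res) stk
      else (res, j :: stk)

def bowlSubarrays (nums : List Int) : Int :=
  let n : Int := nums.length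
  ((PySem.List.pyRange 0 n 1).foldl (fun st i =>
      let p := pvPopLoopA nums i st.1 st.2
      let res := match p.2 with
        | [] => p.1
        | j :: _ => if 2 ≤ i - j then p.1 + 1 else p.1
      (res, i :: p.2)) ((0 : Int), ([] : List Int))).1

-- ===== PORT B =====
-- brute force over pairs (j, i): the slice nums[j+1:i] is nonempty (j ≤ i - 2), so
-- Python's max never raises; max? is some there and the .getD 0 default is never used
def bowlSubarrays_alt (nums : List Int) : Int :=
  let n : Int := nums.length
  (PySem.List.pyRange 0 n 1).foldl (fun res i =>
    (PySem.List.pyRange 0 (i - 1) 1).foldl (fun res j =>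
      let m := (PySem.List.max? (PySem.List.slice nums (some (j + 1)) (some i)) (fun x => x)).getD 0
      if m < PySem.List.pyGetD nums i 0 ∧ m ≤ PySem.List.pyGetD nums j 0 then res + 1 else res)
      res)
    0

-- ===== PRECONDITION & SPEC =====
def Spec_bowlSubarrays (nums : List Int) (out : Int) : Prop := out = bowlSubarrays_alt nums
instance (nums : List Int) (out : Int) : Decidable (Spec_bowlSubarrays nums out) := by unfold Spec_bowlSubarrays; infer_instance

-- ===== CLAIM (what is proved, stated in full; the proofs are below) =====
def Claim_equal_bowlSubarrays : Prop := ∀ (nums : List Int), Dom_bowlSubarrays nums → Spec_bowlSubarrays nums (bowlSubarrays nums)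

-- ===== LEMMAS AND PROOFS =====

def pvV (nums : List Int) (k : Nat) : Int := nums.getD k 0
def pvCond (nums : List Int) (j i : Nat) : Prop :=
  ∀ k, k < i → j < k → pvV nums k < pvV nums i ∧ pvV nums k ≤ pvV nums j

def pvCondB (nums : List Int) (j i : Nat) : Bool :=
  decide (∀ k, k < i → j < k → pvV nums k < pvV nums i ∧ pvV nums k ≤ pvV nums j)

lemma pvCondB_iff (nums : List Int) (j i : Nat) : pvCondB nums j i = true ↔ pvCond nums j i := by
  simp [pvCondB, pvCond]

lemma pv_drop_take_eq_map (nums : List Int) (a m : Nat) (h : a + m ≤ nums.length) :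
    (nums.drop a).take m = (List.range' a m).map (fun k => pvV nums k) := by
  apply List.ext_getElem
  · simp; omega
  · intro n h1 h2
    simp only [pvV, List.getElem_take, List.getElem_drop, List.getElem_map, List.getElem_range']
    rw [List.getD_eq_getElem _ _ (by simp at h1 ⊢; omega)]; simp

lemma pv_inner_cond (nums : List Int) (j i : Nat) (hj : j + 2 ≤ i) (hi : i ≤ nums.length) :
    ((((PySem.List.max? (PySem.List.slice nums (some ((j : Int) + 1)) (some (i : Int))) (fun x => x)).getD 0) <
        PySem.List.pyGetD nums (i : Int) 0 ∧
      ((PySem.List.max? (PySem.List.slice nums (some ((j : Int) + 1)) (some (i : Int))) (fun x => x)).getD 0) ≤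
        PySem.List.pyGetD nums (j : Int) 0)
      ↔ pvCond nums j i) := by
  have hcast : ((j : Int) + 1) = ((j + 1 : Nat) : Int) := by push_cast; ring
  rw [hcast, PySem.List.slice_natCast, pv_drop_take_eq_map nums (j+1) (i - (j+1)) (by omega)]
  have hr : List.range' (j+1) (i - (j+1)) = (j+1) :: List.range' (j+1+1) (i - (j+2)) := by
    rw [show i - (j+1) = (i - (j+2)) + 1 by omega, List.range'_succ]
  rw [hr]
  simp only [List.map_cons, PySem.List.max?_id_cons, Option.getD_some,
    PySem.List.pyGetD_natCast]
  have hmax := PySem.List.le_foldl_max ((List.range' (j+1+1) (i - (j+2))).map (fun k => pvV nums k)) (pvV nums (j+1))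
  have hmem := PySem.List.foldl_max_mem ((List.range' (j+1+1) (i - (j+2))).map (fun k => pvV nums k)) (pvV nums (j+1))
  set M := ((List.range' (j+1+1) (i - (j+2))).map (fun k => pvV nums k)).foldl max (pvV nums (j+1)) with hM
  constructor
  · rintro ⟨h1, h2⟩ k hk hjk
    have : pvV nums k ≤ M := by
      rcases Nat.eq_or_lt_of_le (Nat.succ_le_of_lt hjk) with h | h
      · rw [← h]; exact hmax.1
      · exact hmax.2 _ (List.mem_map_of_mem (by rw [List.mem_range'_1]; omega))
    exact ⟨lt_of_le_of_lt this h1, le_trans this h2⟩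
  · intro hc
    have : M = pvV nums (j+1) ∨ M ∈ (List.range' (j+1+1) (i - (j+2))).map (fun k => pvV nums k) := hmem
    have hMval : ∃ k, k < i ∧ j < k ∧ M = pvV nums k := by
      rcases this with h | h
      · exact ⟨j+1, by omega, by omega, h⟩
      · obtain ⟨k, hk, hv⟩ := List.mem_map.mp h
        rw [List.mem_range'_1] at hk
        exact ⟨k, by omega, by omega, hv.symm⟩
    obtain ⟨k, hk, hjk, hMk⟩ := hMval
    rw [hMk]
    exact (hc k hk hjk)

def pvCnt (nums : List Int) (i : Nat) : Nat :=
  (List.range (i - 1)).countP (fun j => pvCondB nums j i)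

lemma pv_inner_loop (nums : List Int) (i : Nat) (hi : i ≤ nums.length) (res : Int) :
    (PySem.List.pyRange 0 ((i : Int) - 1) 1).foldl (fun res j =>
      let m := (PySem.List.max? (PySem.List.slice nums (some (j + 1)) (some (i : Int))) (fun x => x)).getD 0
      if m < PySem.List.pyGetD nums (i : Int) 0 ∧ m ≤ PySem.List.pyGetD nums j 0 then res + 1 else res)
      res = res + (pvCnt nums i : Int) := by
  rw [PySem.List.pyRange_zero, List.foldl_map]
  have hm : ((i : Int) - 1).toNat = i - 1 := by omega
  rw [hm]
  rw [PySem.List.foldl_congr_mem (List.range (i-1)) _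
    (fun res j => if (fun j => pvCondB nums j i) j = true then res + 1 else res) res
    (by
      intro acc j hj
      rw [List.mem_range] at hj
      simp only
      by_cases h : pvCond nums j i
      · rw [if_pos ((pv_inner_cond nums j i (by omega) hi).mpr h), if_pos (by simpa [pvCondB_iff] using h)]
      · rw [if_neg (fun hc => h ((pv_inner_cond nums j i (by omega) hi).mp hc)), if_neg (by simpa [pvCondB_iff] using h)])]
  rw [PySem.List.foldl_count_if]
  rfl

def pvTot (nums : List Int) : Nat → Int
  | 0 => 0
  | m + 1 => pvTot nums m + (pvCnt nums m : Int)

lemma pv_B_outer (nums : List Int) (m : Nat) (hm : m ≤ nums.length) (res : Int) :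
    (PySem.List.pyRange 0 (m : Int) 1).foldl (fun res i =>
      (PySem.List.pyRange 0 (i - 1) 1).foldl (fun res j =>
        let mx := (PySem.List.max? (PySem.List.slice nums (some (j + 1)) (some i)) (fun x => x)).getD 0
        if mx < PySem.List.pyGetD nums i 0 ∧ mx ≤ PySem.List.pyGetD nums j 0 then res + 1 else res)
        res)
      res = res + pvTot nums m := by
  induction m generalizing res with
  | zero => simp [pvTot, PySem.List.pyRange_one_eq_nil]
  | succ m ih =>
    rw [show ((m + 1 : Nat) : Int) = (m : Int) + 1 by push_cast; ring,
      PySem.List.pyRange_one_succ_right (by omega : (0:Int) ≤ (m : Int)), List.foldl_append,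
      ih (by omega) res]
    simp only [List.foldl_cons, List.foldl_nil]
    rw [pv_inner_loop nums m (by omega)]
    simp [pvTot]; ring

lemma pv_B_eq_tot (nums : List Int) : bowlSubarrays_alt nums = pvTot nums nums.length := by
  have := pv_B_outer nums nums.length le_rfl 0
  simpa [bowlSubarrays_alt] using this

def pvGood (nums : List Int) (j i : Nat) : Prop := ∀ k, k < i → j < k → pvV nums k ≤ pvV nums j

def pvInv (nums : List Int) (i : Nat) (st : List Nat) : Prop :=
  st.Pairwise (· > ·) ∧ ∀ j, j ∈ st ↔ (j < i ∧ pvGood nums j i)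


lemma pv_popLoop (nums : List Int) (i : Nat) (res : Int) (st : List Nat) :
    pvPopLoopA nums (i : Int) res (st.map (Nat.cast : Nat → Int)) =
      (res + ((st.takeWhile (fun j => decide (pvV nums j < pvV nums i))).countP (fun j => decide (j + 2 ≤ i)) : Nat),
       (st.dropWhile (fun j => decide (pvV nums j < pvV nums i))).map (Nat.cast : Nat → Int)) := by
  induction st generalizing res with
  | nil => simp only [List.map_nil, List.takeWhile_nil, List.countP_nil, List.dropWhile_nil, Nat.cast_zero, add_zero]; rfl
  | cons j st ih =>
    rw [List.map_cons]
    show (if PySem.List.pyGetD nums (j:Int) 0 < PySem.List.pyGetD nums (i:Int) 0 then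
        pvPopLoopA nums (i:Int) (if 2 ≤ (i:Int) - (j:Int) then res + 1 else res) (st.map (Nat.cast : Nat → Int))
      else (res, (j:Int) :: st.map (Nat.cast : Nat → Int))) = _
    simp only [PySem.List.pyGetD_natCast]
    by_cases h : pvV nums j < pvV nums i
    · rw [if_pos (by simpa [pvV] using h)]
      rw [ih]
      rw [List.takeWhile_cons_of_pos (by simpa using h), List.dropWhile_cons_of_pos (by simpa using h)]
      rw [List.countP_cons]
      by_cases hg : j + 2 ≤ i
      · rw [if_pos (by omega)]
        simp only [Prod.mk.injEq, hg, decide_true, if_true]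
        exact ⟨by push_cast; ring, trivial⟩
      · rw [if_neg (by omega)]
        simp only [Prod.mk.injEq, hg, decide_false]
        exact ⟨by norm_num, trivial⟩
    · rw [if_neg (by simpa [pvV] using h)]
      rw [List.takeWhile_cons_of_neg (by simpa using h), List.dropWhile_cons_of_neg (by simpa using h)]
      simp

lemma pv_exists_good_aux (nums : List Int) (i : Nat) :
    ∀ d k, k < i → i ≤ k + d →
      ∃ k0, k ≤ k0 ∧ k0 < i ∧ pvGood nums k0 i ∧ pvV nums k ≤ pvV nums k0 := by
  intro d
  induction d with
  | zero => intro k hk hd; omega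
  | succ d ih =>
    intro k hk hd
    by_cases hg : pvGood nums k i
    · exact ⟨k, le_rfl, hk, hg, le_rfl⟩
    · have : ∃ k', k' < i ∧ k < k' ∧ pvV nums k < pvV nums k' := by
        unfold pvGood at hg; push Not at hg
        obtain ⟨k', h1, h2, h3⟩ := hg
        exact ⟨k', h1, h2, h3⟩
      obtain ⟨k', h1, h2, h3⟩ := this
      obtain ⟨k0, hq1, hq2, hq3, hq4⟩ := ih k' h1 (by omega)
      exact ⟨k0, by omega, hq2, hq3, le_trans (le_of_lt h3) hq4⟩

lemma pv_exists_good (nums : List Int) (i : Nat) : ∀ k, k < i →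
    ∃ k0, k ≤ k0 ∧ k0 < i ∧ pvGood nums k0 i ∧ pvV nums k ≤ pvV nums k0 :=
  fun k hk => pv_exists_good_aux nums i i k hk (by omega)

-- abbreviations used in the stack analysis
-- (takeWhile/dropWhile with predicate "value < value at i")

lemma pv_st_facts (nums : List Int) (i : Nat) (st : List Nat) (h : pvInv nums i st) :
    (∀ j ∈ st, j < i ∧ pvGood nums j i) ∧
    (∀ j1 ∈ st, ∀ j2 ∈ st, j2 < j1 → pvV nums j1 ≤ pvV nums j2) := by
  refine ⟨fun j hj => (h.2 j).mp hj, fun j1 h1 j2 h2 hlt => ?_⟩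
  have g2 := ((h.2 j2).mp h2).2
  have l1 := ((h.2 j1).mp h1).1
  exact g2 j1 l1 hlt

lemma pv_mem_dropWhile (nums : List Int) (i : Nat) (st : List Nat) (h : pvInv nums i st) :
    ∀ j ∈ st.dropWhile (fun j => decide (pvV nums j < pvV nums i)), pvV nums i ≤ pvV nums j := by
  intro j hj
  set p := (fun j => decide (pvV nums j < pvV nums i)) with hp
  have hne : st.dropWhile p ≠ [] := by intro hc; rw [hc] at hj; simp at hj
  set d0 := (st.dropWhile p).head hne with hd0
  have hhead : p d0 = false := List.head_dropWhile_not p hne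
  have hd0v : pvV nums i ≤ pvV nums d0 := by
    simp only [hp, decide_eq_false_iff_not, not_lt] at hhead; exact hhead
  have hd0mem : d0 ∈ st := (List.dropWhile_sublist p).mem (List.head_mem hne)
  have hjmem : j ∈ st := (List.dropWhile_sublist p).mem hj
  obtain ⟨D', hD⟩ : ∃ D', st.dropWhile p = d0 :: D' := ⟨(st.dropWhile p).tail, (List.cons_head_tail hne).symm⟩
  rw [hD] at hj
  rcases List.mem_cons.mp hj with rfl | hj'
  · exact hd0v
  · have hpw : (d0 :: D').Pairwise (· > ·) := by
      rw [← hD]; exact List.Pairwise.sublist (List.dropWhile_sublist p) h.1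
    have hgt : d0 > j := (List.pairwise_cons.mp hpw).1 j hj'
    exact le_trans hd0v ((pv_st_facts nums i st h).2 d0 hd0mem j hjmem hgt)

lemma pv_mem_take_iff (nums : List Int) (i : Nat) (st : List Nat) (h : pvInv nums i st) (j : Nat) :
    j ∈ st.takeWhile (fun j => decide (pvV nums j < pvV nums i)) ↔
      j ∈ st ∧ pvV nums j < pvV nums i := by
  set p := (fun j => decide (pvV nums j < pvV nums i)) with hp
  constructor
  · intro hj
    refine ⟨(List.takeWhile_sublist p).mem hj, ?_⟩
    have := List.mem_takeWhile_imp hj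
    simpa [hp] using this
  · rintro ⟨hj, hv⟩
    have := List.takeWhile_append_dropWhile (p := p) (l := st)
    rcases List.mem_append.mp (by rw [this]; exact hj) with h1 | h1
    · exact h1
    · exact absurd (pv_mem_dropWhile nums i st h j h1) (by omega)

lemma pv_mem_drop_iff (nums : List Int) (i : Nat) (st : List Nat) (h : pvInv nums i st) (j : Nat) :
    j ∈ st.dropWhile (fun j => decide (pvV nums j < pvV nums i)) ↔
      j ∈ st ∧ pvV nums i ≤ pvV nums j := by
  set p := (fun j => decide (pvV nums j < pvV nums i)) with hp
  constructor
  · intro hj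
    exact ⟨(List.dropWhile_sublist p).mem hj, pv_mem_dropWhile nums i st h j hj⟩
  · rintro ⟨hj, hv⟩
    have := List.takeWhile_append_dropWhile (p := p) (l := st)
    rcases List.mem_append.mp (by rw [this]; exact hj) with h1 | h1
    · have := List.mem_takeWhile_imp h1
      simp only [hp, decide_eq_true_eq] at this
      omega
    · exact h1

-- the crux: which j's are counted when i is processed
lemma pv_cond_char (nums : List Int) (i : Nat) (st : List Nat) (h : pvInv nums i st) (x : Nat) :
    (x + 2 ≤ i ∧ pvCond nums x i) ↔
      ((x ∈ st ∧ pvV nums x < pvV nums i ∧ x + 2 ≤ i) ∨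
       (∃ D', st.dropWhile (fun j => decide (pvV nums j < pvV nums i)) = x :: D' ∧ x + 2 ≤ i)) := by
  set p := (fun j => decide (pvV nums j < pvV nums i)) with hp
  constructor
  · rintro ⟨hx2, hc⟩
    have hgood : pvGood nums x i := fun k hk hxk => (hc k hk hxk).2
    have hxst : x ∈ st := (h.2 x).mpr ⟨by omega, hgood⟩
    by_cases hv : pvV nums x < pvV nums i
    · exact Or.inl ⟨hxst, hv, hx2⟩
    · refine Or.inr ?_
      have hxD : x ∈ st.dropWhile p := (pv_mem_drop_iff nums i st h x).mpr ⟨hxst, by omega⟩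
      have hne : st.dropWhile p ≠ [] := by intro hc'; rw [hc'] at hxD; simp at hxD
      obtain ⟨d0, D', hD⟩ : ∃ d0 D', st.dropWhile p = d0 :: D' :=
        ⟨_, _, (List.cons_head_tail hne).symm⟩
      have hd0 : d0 ∈ st ∧ pvV nums i ≤ pvV nums d0 :=
        (pv_mem_drop_iff nums i st h d0).mp (by rw [hD]; exact List.mem_cons_self)
      have : d0 = x := by
        rw [hD] at hxD
        rcases List.mem_cons.mp hxD with rfl | hx'
        · rfl
        · -- x in the tail: d0 > x, but then pvCond forces pvV d0 < pvV i, contradiction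
          have hpw : (d0 :: D').Pairwise (· > ·) := by
            rw [← hD]; exact List.Pairwise.sublist (List.dropWhile_sublist p) h.1
          have hgt : d0 > x := (List.pairwise_cons.mp hpw).1 x hx'
          have := (hc d0 ((h.2 d0).mp hd0.1).1 hgt).1
          omega
      exact ⟨D', by rw [hD, this], hx2⟩
  · rintro (⟨hxst, hv, hx2⟩ | ⟨D', hD, hx2⟩)
    · have hgood := ((h.2 x).mp hxst).2
      exact ⟨hx2, fun k hk hxk => ⟨by have := hgood k hk hxk; omega, hgood k hk hxk⟩⟩
    · have hxD : x ∈ st.dropWhile p := by rw [hD]; exact List.mem_cons_self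
      have hx' := (pv_mem_drop_iff nums i st h x).mp hxD
      have hgood := ((h.2 x).mp hx'.1).2
      refine ⟨hx2, fun k hk hxk => ⟨?_, hgood k hk hxk⟩⟩
      -- show pvV k < pvV i via a good index k0 ≥ k
      by_contra hge
      push Not at hge
      obtain ⟨k0, hk1, hk2, hk3, hk4⟩ := pv_exists_good nums i k hk
      have hk0st : k0 ∈ st := (h.2 k0).mpr ⟨hk2, hk3⟩
      have hk0D : k0 ∈ st.dropWhile p :=
        (pv_mem_drop_iff nums i st h k0).mpr ⟨hk0st, le_trans hge hk4⟩
      rw [hD] at hk0D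
      rcases List.mem_cons.mp hk0D with rfl | hk0'
      · omega
      · have hpw : (x :: D').Pairwise (· > ·) := by
          rw [← hD]; exact List.Pairwise.sublist (List.dropWhile_sublist p) h.1
        have := (List.pairwise_cons.mp hpw).1 k0 hk0'
        omega

lemma pv_count_step (nums : List Int) (i : Nat) (st : List Nat) (h : pvInv nums i st) :
    (st.takeWhile (fun j => decide (pvV nums j < pvV nums i))).countP (fun j => decide (j + 2 ≤ i))
      + (match st.dropWhile (fun j => decide (pvV nums j < pvV nums i)) with
         | [] => 0
         | j :: _ => if j + 2 ≤ i then 1 else 0) = pvCnt nums i := by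
  set p := (fun j => decide (pvV nums j < pvV nums i)) with hp
  set q := (fun j : Nat => decide (j + 2 ≤ i)) with hq
  have hnodupst : st.Nodup := h.1.imp (fun hab => Nat.ne_of_gt hab)
  have hTn : ((st.takeWhile p).filter q).Nodup :=
    (List.filter_sublist.trans (List.takeWhile_sublist p)).nodup hnodupst
  have hRn : ((List.range (i - 1)).filter (fun j => pvCondB nums j i)).Nodup :=
    List.filter_sublist.nodup List.nodup_range
  have hchar : ∀ x, x ∈ (st.takeWhile p).filter q ↔ (x ∈ st ∧ pvV nums x < pvV nums i ∧ x + 2 ≤ i) := by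
    intro x
    rw [List.mem_filter, pv_mem_take_iff nums i st h]
    simp only [hq, decide_eq_true_eq]
    tauto
  have hrange : ∀ x, x ∈ (List.range (i - 1)).filter (fun j => pvCondB nums j i) ↔
      (x + 2 ≤ i ∧ pvCond nums x i) := by
    intro x
    rw [List.mem_filter, List.mem_range, pvCondB_iff]
    constructor
    · rintro ⟨h1, h2⟩; exact ⟨by omega, h2⟩
    · rintro ⟨h1, h2⟩; exact ⟨by omega, h2⟩
  rw [List.countP_eq_length_filter]
  unfold pvCnt
  rw [List.countP_eq_length_filter]
  cases hD : st.dropWhile p with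
  | nil =>
    rw [show (match ([] : List Nat) with | [] => 0 | j :: _ => if j + 2 ≤ i then 1 else 0) = 0 from rfl]
    have hperm : ((st.takeWhile p).filter q).Perm
        ((List.range (i - 1)).filter (fun j => pvCondB nums j i)) := by
      rw [List.perm_ext_iff_of_nodup hTn hRn]
      intro x
      rw [hchar x, hrange x]
      have hc := pv_cond_char nums i st h x
      rw [hD] at hc
      rw [hc]
      constructor
      · exact Or.inl
      · rintro (hl | ⟨D', hD', _⟩)
        · exact hl
        · simp at hD'
    simpa using hperm.length_eq
  | cons d D' =>
    rw [show (match d :: D' with | [] => 0 | j :: _ => if j + 2 ≤ i then 1 else 0) = (if d + 2 ≤ i then 1 else 0) from rfl]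
    by_cases hd : d + 2 ≤ i
    · have hdn : d ∉ (st.takeWhile p).filter q := by
        rw [hchar d]
        rintro ⟨_, hv, _⟩
        have : d ∈ st.dropWhile p := by rw [hD]; exact List.mem_cons_self
        have := pv_mem_dropWhile nums i st h d this
        omega
      have hperm : ((st.takeWhile p).filter q ++ [d]).Perm
          ((List.range (i - 1)).filter (fun j => pvCondB nums j i)) := by
        rw [List.perm_ext_iff_of_nodup (hTn.append (List.nodup_singleton d)
          (fun a ha hb => by simp only [List.mem_singleton] at hb; subst hb; exact hdn ha)) hRn]
        intro x
        rw [List.mem_append, hchar x, hrange x]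
        have hc := pv_cond_char nums i st h x
        rw [hD] at hc
        rw [hc]
        simp only [List.mem_singleton]
        constructor
        · rintro (hl | rfl)
          · exact Or.inl hl
          · exact Or.inr ⟨D', rfl, hd⟩
        · rintro (hl | ⟨D'', hD'', hx2⟩)
          · exact Or.inl hl
          · cases hD''; exact Or.inr rfl
      have := hperm.length_eq
      simp only [List.length_append, List.length_singleton] at this
      rw [if_pos hd]
      omega
    · have hperm : ((st.takeWhile p).filter q).Perm
          ((List.range (i - 1)).filter (fun j => pvCondB nums j i)) := by
        rw [List.perm_ext_iff_of_nodup hTn hRn]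
        intro x
        rw [hchar x, hrange x]
        have hc := pv_cond_char nums i st h x
        rw [hD] at hc
        rw [hc]
        constructor
        · exact Or.inl
        · rintro (hl | ⟨D'', hD'', hx2⟩)
          · exact hl
          · cases hD''; omega
      rw [if_neg hd]
      simpa using hperm.length_eq

lemma pv_stack_step (nums : List Int) (i : Nat) (st : List Nat) (h : pvInv nums i st) :
    pvInv nums (i + 1) (i :: st.dropWhile (fun j => decide (pvV nums j < pvV nums i))) := by
  set p := (fun j => decide (pvV nums j < pvV nums i)) with hp
  constructor
  · rw [List.pairwise_cons]
    refine ⟨fun j hj => ?_, List.Pairwise.sublist (List.dropWhile_sublist p) h.1⟩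
    have := ((pv_mem_drop_iff nums i st h j).mp hj).1
    exact ((h.2 j).mp this).1
  · intro j
    rw [List.mem_cons, pv_mem_drop_iff nums i st h]
    constructor
    · rintro (rfl | ⟨hj, hv⟩)
      · exact ⟨by omega, fun k hk hjk => by omega⟩
      · obtain ⟨hji, hg⟩ := (h.2 j).mp hj
        refine ⟨by omega, fun k hk hjk => ?_⟩
        rcases Nat.lt_or_ge k i with hki | hki
        · exact hg k hki hjk
        · have : k = i := by omega
          subst this
          exact hv
    · rintro ⟨hji, hg⟩
      rcases Nat.eq_or_lt_of_le (Nat.lt_succ_iff.mp hji) with rfl | hji'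
      · exact Or.inl rfl
      · refine Or.inr ⟨(h.2 j).mpr ⟨hji', fun k hk hjk => hg k (by omega) hjk⟩, ?_⟩
        exact hg i (by omega) hji'

lemma pv_A_fold (nums : List Int) (m : Nat) (hm : m ≤ nums.length) :
    ∃ st, pvInv nums m st ∧
      (PySem.List.pyRange 0 (m : Int) 1).foldl (fun st i =>
        let p := pvPopLoopA nums i st.1 st.2
        let res := match p.2 with
          | [] => p.1
          | j :: _ => if 2 ≤ i - j then p.1 + 1 else p.1
        (res, i :: p.2)) ((0 : Int), ([] : List Int))
      = (pvTot nums m, st.map (Nat.cast : Nat → Int)) := by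
  induction m with
  | zero =>
    refine ⟨[], ⟨List.Pairwise.nil, fun j => by simp⟩, ?_⟩
    simp [pvTot, PySem.List.pyRange_one_eq_nil]
  | succ m ih =>
    obtain ⟨st, hinv, hfold⟩ := ih (by omega)
    refine ⟨m :: st.dropWhile (fun j => decide (pvV nums j < pvV nums m)),
      pv_stack_step nums m st hinv, ?_⟩
    rw [show ((m + 1 : Nat) : Int) = (m : Int) + 1 by push_cast; ring,
      PySem.List.pyRange_one_succ_right (by omega : (0:Int) ≤ (m : Int)), List.foldl_append,
      hfold]
    simp only [List.foldl_cons, List.foldl_nil]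
    rw [pv_popLoop nums m (pvTot nums m) st]
    have hcount := pv_count_step nums m st hinv
    set T := st.takeWhile (fun j => decide (pvV nums j < pvV nums m)) with hT
    set D := st.dropWhile (fun j => decide (pvV nums j < pvV nums m)) with hD
    cases hDc : D with
    | nil =>
      simp only [List.map_nil]
      rw [hDc] at hcount
      simp only [Prod.mk.injEq]
      refine ⟨?_, rfl⟩
      show pvTot nums m + (T.countP (fun j => decide (j + 2 ≤ m)) : Int) = pvTot nums (m + 1)
      rw [show pvTot nums (m + 1) = pvTot nums m + (pvCnt nums m : Int) from rfl, ← hcount]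
      push_cast
      ring
    | cons d D' =>
      rw [hDc] at hcount
      rw [show (match d :: D' with | [] => 0 | j :: _ => if j + 2 ≤ m then 1 else 0)
        = (if d + 2 ≤ m then 1 else 0) from rfl] at hcount
      simp only [List.map_cons]
      simp only [Prod.mk.injEq]
      constructor
      · by_cases hd : d + 2 ≤ m
        · rw [if_pos hd] at hcount
          rw [if_pos (by omega)]
          show pvTot nums m + _ + 1 = pvTot nums (m + 1)
          rw [show pvTot nums (m + 1) = pvTot nums m + (pvCnt nums m : Int) from rfl, ← hcount]
          push_cast
          ring
        · rw [if_neg hd] at hcount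
          rw [if_neg (by omega)]
          show pvTot nums m + _ = pvTot nums (m + 1)
          rw [show pvTot nums (m + 1) = pvTot nums m + (pvCnt nums m : Int) from rfl, ← hcount]
          push_cast
          ring
      · trivial

-- ===== VERDICT (by name: the statement is the Claim_ definition above) =====
theorem bowlSubarrays_spec : Claim_equal_bowlSubarrays := by
  intro nums _
  show _ = _
  obtain ⟨st, _, hfold⟩ := pv_A_fold nums nums.length le_rfl
  rw [pv_B_eq_tot, bowlSubarrays, hfold]
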